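-- pv_equiv track=rewrite | github.com/khiembk/optimize-plan-scheduling | Test_queen_large.py | count_inter_segment_conflicts
-- ===== SOURCE A (Python) =====
-- def count_inter_segment_conflicts(queens, seg1_start, seg1_end, seg2_start, seg2_end):
--     """Counts diagonal conflicts between two segments."""
--     conflicts = 0
--     for col1 in range(seg1_start, seg1_end):
--         row1 = queens[col1]
--         for col2 in range(seg2_start, seg2_end):
--             row2 = queens[col2]
--             if abs(row1 - row2) == abs(col1 - col2):  # Diagonal conflict
--                 conflicts += 1
--     return conflicts
-- ===== SOURCE B (Python) =====
-- def count_inter_segment_conflicts(queens, seg1_start, seg1_end, seg2_start, seg2_end):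
--     """Counts diagonal conflicts between two segments via diagonal hashing (single pass per segment):
--     |r1-r2| == |c1-c2|  iff  r1-c1 == r2-c2  or  r1+c1 == r2+c2, and both hold
--     exactly when c1 == c2 (inclusion-exclusion on the shared columns)."""
--     if seg1_start >= seg1_end:
--         return 0  # empty first segment: no pairs
--     diag_diff = {}
--     diag_sum = {}
--     for c1 in range(seg1_start, seg1_end):
--         r1 = queens[c1]
--         diag_diff[r1 - c1] = diag_diff.get(r1 - c1, 0) + 1
--         diag_sum[r1 + c1] = diag_sum.get(r1 + c1, 0) + 1
--     total = 0
--     for c2 in range(seg2_start, seg2_end):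
--         r2 = queens[c2]
--         total += diag_diff.get(r2 - c2, 0) + diag_sum.get(r2 + c2, 0)
--     overlap = min(seg1_end, seg2_end) - max(seg1_start, seg2_start)
--     return total - max(0, overlap)
-- ===== Notes on version B (the rewrite author's own statement) =====
-- stated objective: alternative
-- what changed: Replaces A's nested scan over all pairs of the two segments by a single pass that hashes segment 1's two diagonal keys (row-col and row+col) into counters, a single lookup pass over segment 2, and an inclusion-exclusion correction (a closed-form count of the shared columns) for pairs lying on both diagonals.
import Mathlib
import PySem

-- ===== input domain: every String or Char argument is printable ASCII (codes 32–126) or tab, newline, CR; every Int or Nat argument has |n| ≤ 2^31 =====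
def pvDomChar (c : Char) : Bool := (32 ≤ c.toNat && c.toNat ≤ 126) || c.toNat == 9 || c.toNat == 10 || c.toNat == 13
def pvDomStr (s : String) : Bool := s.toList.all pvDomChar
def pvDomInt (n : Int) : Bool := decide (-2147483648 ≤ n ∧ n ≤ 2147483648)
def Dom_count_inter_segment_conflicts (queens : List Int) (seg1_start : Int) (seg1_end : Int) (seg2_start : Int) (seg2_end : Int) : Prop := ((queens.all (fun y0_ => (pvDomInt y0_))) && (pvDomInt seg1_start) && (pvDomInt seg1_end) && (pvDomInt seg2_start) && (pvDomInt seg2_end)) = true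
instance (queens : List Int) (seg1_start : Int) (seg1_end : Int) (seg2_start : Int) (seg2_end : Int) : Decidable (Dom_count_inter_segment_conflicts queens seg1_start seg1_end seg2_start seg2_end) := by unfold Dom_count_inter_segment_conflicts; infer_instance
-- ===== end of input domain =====

-- B replaces A's nested pairwise scan by hashing the two diagonal keys (row-col, row+col) of
-- segment 1 into counters and looking them up once per queen of segment 2, with an
-- inclusion-exclusion correction for the shared columns: objective = alternative algorithm.

-- ===== PORT A =====
def count_inter_segment_conflicts (queens : List Int) (seg1_start : Int) (seg1_end : Int) (seg2_start : Int) (seg2_end : Int) : Int :=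
  (PySem.List.pyRange seg1_start seg1_end 1).foldl (fun conflicts col1 =>
    let row1 := PySem.List.pyGetD queens col1 0
    (PySem.List.pyRange seg2_start seg2_end 1).foldl (fun acc col2 =>
      let row2 := PySem.List.pyGetD queens col2 0
      if |row1 - row2| = |col1 - col2| then acc + 1 else acc) conflicts) 0

-- ===== PORT B =====
def count_inter_segment_conflicts_alt (queens : List Int) (seg1_start : Int) (seg1_end : Int) (seg2_start : Int) (seg2_end : Int) : Int :=
  if seg1_start ≥ seg1_end then 0  -- empty first segment: no pairs
  else
    let dicts := (PySem.List.pyRange seg1_start seg1_end 1).foldl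
      (fun (p : PySem.Dict Int Int × PySem.Dict Int Int) c1 =>
        let r1 := PySem.List.pyGetD queens c1 0
        (p.1.insert (r1 - c1) (p.1.getD (r1 - c1) 0 + 1),
         p.2.insert (r1 + c1) (p.2.getD (r1 + c1) 0 + 1)))
      (PySem.Dict.empty, PySem.Dict.empty)
    let total := (PySem.List.pyRange seg2_start seg2_end 1).foldl
      (fun acc c2 =>
        let r2 := PySem.List.pyGetD queens c2 0
        acc + dicts.1.getD (r2 - c2) 0 + dicts.2.getD (r2 + c2) 0) 0
    total - max 0 (min seg1_end seg2_end - max seg1_start seg2_start)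

-- ===== PRECONDITION & SPEC =====
-- Pre_: every index either loop reads must be a valid Python index of queens (else A raises
-- IndexError); the second loop's indices only matter when the first segment is nonempty.
def Pre_count_inter_segment_conflicts (queens : List Int) (seg1_start : Int) (seg1_end : Int) (seg2_start : Int) (seg2_end : Int) : Prop :=
  (seg1_end ≤ seg1_start ∨
    (-(queens.length : Int) ≤ seg1_start ∧ seg1_end ≤ (queens.length : Int))) ∧
  (seg1_start < seg1_end →
    (seg2_end ≤ seg2_start ∨
      (-(queens.length : Int) ≤ seg2_start ∧ seg2_end ≤ (queens.length : Int))))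
instance (queens : List Int) (seg1_start : Int) (seg1_end : Int) (seg2_start : Int) (seg2_end : Int) : Decidable (Pre_count_inter_segment_conflicts queens seg1_start seg1_end seg2_start seg2_end) := by unfold Pre_count_inter_segment_conflicts; infer_instance

def pvWitness_count_inter_segment_conflicts : List Int × Int × Int × Int × Int := ([1, 3, 0, 2], 0, 2, 2, 4)

def Spec_count_inter_segment_conflicts (queens : List Int) (seg1_start : Int) (seg1_end : Int) (seg2_start : Int) (seg2_end : Int) (out : Int) : Prop := out = count_inter_segment_conflicts_alt queens seg1_start seg1_end seg2_start seg2_end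
instance (queens : List Int) (seg1_start : Int) (seg1_end : Int) (seg2_start : Int) (seg2_end : Int) (out : Int) : Decidable (Spec_count_inter_segment_conflicts queens seg1_start seg1_end seg2_start seg2_end out) := by unfold Spec_count_inter_segment_conflicts; infer_instance

-- ===== CLAIM (what is proved, stated in full; the proofs are below) =====
def Claim_equal_count_inter_segment_conflicts : Prop := ∀ (queens : List Int) (seg1_start : Int) (seg1_end : Int) (seg2_start : Int) (seg2_end : Int), Dom_count_inter_segment_conflicts queens seg1_start seg1_end seg2_start seg2_end → Pre_count_inter_segment_conflicts queens seg1_start seg1_end seg2_start seg2_end → Spec_count_inter_segment_conflicts queens seg1_start seg1_end seg2_start seg2_end (count_inter_segment_conflicts queens seg1_start seg1_end seg2_start seg2_end)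

-- ===== LEMMAS AND PROOFS =====

-- a counting 'if' loop is 'init + sum of 0/1 indicators'
theorem pvFoldlIf {α : Type} (l : List α) (p : α → Prop) [DecidablePred p] (a : Int) :
    l.foldl (fun acc x => if p x then acc + 1 else acc) a
      = a + (l.map (fun x => if p x then (1 : Int) else 0)).sum := by
  induction l generalizing a with
  | nil => simp
  | cons x t ih => simp only [List.foldl_cons, List.map_cons, List.sum_cons]
                   rw [ih]; split_ifs <;> ring_nf

-- sum of a pointwise (p + q - r) decomposition
theorem pvSumSplit {α : Type} (l : List α) (g p q r : α → Int)
    (h : ∀ x ∈ l, g x = p x + q x - r x) :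
    (l.map g).sum = (l.map p).sum + (l.map q).sum - (l.map r).sum := by
  induction l with
  | nil => simp
  | cons x t ih =>
      simp only [List.map_cons, List.sum_cons]
      rw [ih (fun y hy => h y (List.mem_cons_of_mem x hy)), h x (List.mem_cons_self)]
      ring

-- swapping a double sum
theorem pvSumComm {α β : Type} (l1 : List α) (l2 : List β) (f : α → β → Int) :
    (l1.map (fun x => (l2.map (f x)).sum)).sum
      = (l2.map (fun y => (l1.map (fun x => f x y)).sum)).sum := by
  induction l1 with
  | nil => simp
  | cons x t ih =>
      simp only [List.map_cons, List.sum_cons, ih]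
      rw [← PySem.List.sum_map_add_int]

-- sum of equality indicators over a nodup list is a membership indicator
theorem pvSumEqIndicator (l : List Int) (hnd : l.Nodup) (c : Int) :
    (l.map (fun x => if x = c then (1 : Int) else 0)).sum = if c ∈ l then 1 else 0 := by
  induction l with
  | nil => simp
  | cons x t ih =>
      simp only [List.map_cons, List.sum_cons, List.mem_cons]
      have hx := (List.nodup_cons.mp hnd).1
      rw [ih (List.nodup_cons.mp hnd).2]
      by_cases hxc : x = c
      · subst hxc; simp [hx]
      · simp [hxc, Ne.symm hxc]

-- the membership-indicator sum over range2 is the closed-form overlap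
theorem pvOverlap (s1 e1 s2 e2 : Int) :
    ((PySem.List.pyRange s2 e2 1).map
        (fun c => if s1 ≤ c ∧ c < e1 then (1 : Int) else 0)).sum
      = max 0 (min e1 e2 - max s1 s2) := by
  by_cases h : e2 ≤ s2
  · rw [PySem.List.pyRange_one_eq_nil h]; simp; omega
  · have h' : s2 < e2 := by omega
    have hn : (e2 - s2).toNat ≠ 0 := by omega
    -- induction on the length of range2
    have key : ∀ n : ℕ, ∀ s2 : Int, (e2 - s2).toNat = n →
        ((PySem.List.pyRange s2 e2 1).map
            (fun c => if s1 ≤ c ∧ c < e1 then (1 : Int) else 0)).sum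
          = max 0 (min e1 e2 - max s1 s2) := by
      intro n
      induction n with
      | zero => intro s2 h0
                rw [PySem.List.pyRange_one_eq_nil (by omega)]
                simp; omega
      | succ n ih =>
          intro s2 hs
          rw [PySem.List.pyRange_one_cons (by omega)]
          simp only [List.map_cons, List.sum_cons]
          rw [ih (s2 + 1) (by omega)]
          split_ifs with hc <;> omega
    exact key _ s2 rfl

-- a dict counter lookup, as an indicator sum over the scanned list
theorem pvCounterSum {α : Type} (l : List α) (f : α → Int) (k : Int) :
    ((PySem.Dict.counter (l.map f)).getD k 0 : Int)
      = (l.map (fun x => if f x = k then (1 : Int) else 0)).sum := by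
  rw [PySem.Dict.getD_counter]
  induction l with
  | nil => simp
  | cons x t ih =>
      rw [List.map_cons, List.map_cons, List.sum_cons, List.count_cons]
      by_cases hx : f x = k
      · rw [if_pos (beq_iff_eq.mpr hx), if_pos hx]
        push_cast
        rw [ih]
        ring
      · rw [if_neg (by simpa using hx), if_neg hx]
        push_cast
        rw [ih]
        ring

-- the inner loop of A, for one fixed col1, as an indicator sum
theorem pvInnerA (queens : List Int) (s2 e2 : Int) (col1 : Int) (acc : Int) :
    (PySem.List.pyRange s2 e2 1).foldl (fun acc col2 =>
        let row2 := PySem.List.pyGetD queens col2 0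
        if |PySem.List.pyGetD queens col1 0 - row2| = |col1 - col2| then acc + 1 else acc) acc
      = acc + ((PySem.List.pyRange s2 e2 1).map (fun col2 =>
          if |PySem.List.pyGetD queens col1 0 - PySem.List.pyGetD queens col2 0| = |col1 - col2|
          then (1 : Int) else 0)).sum := by
  exact pvFoldlIf _ _ _

-- A as a double indicator sum
theorem pvAeq (queens : List Int) (s1 e1 s2 e2 : Int) :
    count_inter_segment_conflicts queens s1 e1 s2 e2
      = ((PySem.List.pyRange s1 e1 1).map (fun c1 =>
          ((PySem.List.pyRange s2 e2 1).map (fun c2 =>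
            if |PySem.List.pyGetD queens c1 0 - PySem.List.pyGetD queens c2 0| = |c1 - c2|
            then (1 : Int) else 0)).sum)).sum := by
  unfold count_inter_segment_conflicts
  have hfun : (fun (conflicts : Int) (col1 : Int) =>
      (PySem.List.pyRange s2 e2 1).foldl (fun acc col2 =>
        let row2 := PySem.List.pyGetD queens col2 0
        if |PySem.List.pyGetD queens col1 0 - row2| = |col1 - col2| then acc + 1 else acc) conflicts)
      = (fun (conflicts : Int) (col1 : Int) => conflicts +
          ((PySem.List.pyRange s2 e2 1).map (fun c2 =>
            if |PySem.List.pyGetD queens col1 0 - PySem.List.pyGetD queens c2 0| = |col1 - c2|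
            then (1 : Int) else 0)).sum) := by
    funext acc col1; exact pvInnerA queens s2 e2 col1 acc
  simp only [hfun]
  rw [PySem.List.foldl_add]
  ring

-- B (in the nonempty-segment-1 case) as indicator sums
theorem pvBeq (queens : List Int) (s1 e1 s2 e2 : Int) (h : ¬ s1 ≥ e1) :
    count_inter_segment_conflicts_alt queens s1 e1 s2 e2
      = ((PySem.List.pyRange s2 e2 1).map (fun c2 =>
            ((PySem.List.pyRange s1 e1 1).map (fun c1 =>
              if PySem.List.pyGetD queens c1 0 - c1 = PySem.List.pyGetD queens c2 0 - c2
              then (1 : Int) else 0)).sum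
          + ((PySem.List.pyRange s1 e1 1).map (fun c1 =>
              if PySem.List.pyGetD queens c1 0 + c1 = PySem.List.pyGetD queens c2 0 + c2
              then (1 : Int) else 0)).sum)).sum
        - max 0 (min e1 e2 - max s1 s2) := by
  unfold count_inter_segment_conflicts_alt
  rw [if_neg h]
  have hzeta : (fun (p : PySem.Dict Int Int × PySem.Dict Int Int) (c1 : Int) =>
      let r1 := PySem.List.pyGetD queens c1 0
      (p.1.insert (r1 - c1) (p.1.getD (r1 - c1) 0 + 1),
       p.2.insert (r1 + c1) (p.2.getD (r1 + c1) 0 + 1)))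
    = (fun (p : PySem.Dict Int Int × PySem.Dict Int Int) (c1 : Int) =>
      (p.1.insert (PySem.List.pyGetD queens c1 0 - c1)
        (p.1.getD (PySem.List.pyGetD queens c1 0 - c1) 0 + 1),
       p.2.insert (PySem.List.pyGetD queens c1 0 + c1)
        (p.2.getD (PySem.List.pyGetD queens c1 0 + c1) 0 + 1))) := rfl
  rw [hzeta]
  have hsplit := PySem.List.foldl_prod_mk
      (fun (d : PySem.Dict Int Int) (c1 : Int) => d.insert (PySem.List.pyGetD queens c1 0 - c1)
        (d.getD (PySem.List.pyGetD queens c1 0 - c1) 0 + 1))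
      (fun (d : PySem.Dict Int Int) (c1 : Int) => d.insert (PySem.List.pyGetD queens c1 0 + c1)
        (d.getD (PySem.List.pyGetD queens c1 0 + c1) 0 + 1))
      (PySem.List.pyRange s1 e1 1) PySem.Dict.empty PySem.Dict.empty
  rw [hsplit]
  have hd : (PySem.List.pyRange s1 e1 1).foldl
      (fun d c1 => d.insert (PySem.List.pyGetD queens c1 0 - c1)
        (d.getD (PySem.List.pyGetD queens c1 0 - c1) 0 + 1)) PySem.Dict.empty
      = PySem.Dict.counter ((PySem.List.pyRange s1 e1 1).map (fun c1 => PySem.List.pyGetD queens c1 0 - c1)) := by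
    rw [← PySem.Dict.foldl_insert_getD_add_one_eq_counter, List.foldl_map]
  have hs : (PySem.List.pyRange s1 e1 1).foldl
      (fun d c1 => d.insert (PySem.List.pyGetD queens c1 0 + c1)
        (d.getD (PySem.List.pyGetD queens c1 0 + c1) 0 + 1)) PySem.Dict.empty
      = PySem.Dict.counter ((PySem.List.pyRange s1 e1 1).map (fun c1 => PySem.List.pyGetD queens c1 0 + c1)) := by
    rw [← PySem.Dict.foldl_insert_getD_add_one_eq_counter, List.foldl_map]
  simp only [hd, hs]
  have hfun : (fun (acc : Int) (c2 : Int) =>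
      acc + (PySem.Dict.counter ((PySem.List.pyRange s1 e1 1).map (fun c1 => PySem.List.pyGetD queens c1 0 - c1))).getD (PySem.List.pyGetD queens c2 0 - c2) 0
          + (PySem.Dict.counter ((PySem.List.pyRange s1 e1 1).map (fun c1 => PySem.List.pyGetD queens c1 0 + c1))).getD (PySem.List.pyGetD queens c2 0 + c2) 0)
      = (fun (acc : Int) (c2 : Int) => acc +
          (((PySem.List.pyRange s1 e1 1).map (fun c1 =>
              if PySem.List.pyGetD queens c1 0 - c1 = PySem.List.pyGetD queens c2 0 - c2
              then (1 : Int) else 0)).sum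
          + ((PySem.List.pyRange s1 e1 1).map (fun c1 =>
              if PySem.List.pyGetD queens c1 0 + c1 = PySem.List.pyGetD queens c2 0 + c2
              then (1 : Int) else 0)).sum)) := by
    funext acc c2
    rw [pvCounterSum, pvCounterSum]
    ring
  simp only [hfun]
  rw [PySem.List.foldl_add]
  ring

-- pointwise inclusion-exclusion on the diagonal conditions (r computed from the column)
theorem pvPointwise (queens : List Int) (c1 c2 : Int) :
    (if |PySem.List.pyGetD queens c1 0 - PySem.List.pyGetD queens c2 0| = |c1 - c2|
     then (1 : Int) else 0)
      = (if PySem.List.pyGetD queens c1 0 - c1 = PySem.List.pyGetD queens c2 0 - c2 then (1:Int) else 0)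
      + (if PySem.List.pyGetD queens c1 0 + c1 = PySem.List.pyGetD queens c2 0 + c2 then (1:Int) else 0)
      - (if c1 = c2 then (1:Int) else 0) := by
  by_cases h : c1 = c2
  · subst h; simp
  · split_ifs with h1 h2 h3 h2 h3 h3 <;>
      first
      | rfl
      | (exfalso; rw [abs_eq_abs] at *; omega)

-- ===== VERDICT (by name: the statement is the Claim_ definition above) =====
theorem count_inter_segment_conflicts_spec : Claim_equal_count_inter_segment_conflicts := by
  intro queens s1 e1 s2 e2 _hdom _hpre
  unfold Spec_count_inter_segment_conflicts
  by_cases h : s1 ≥ e1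
  · -- first segment empty: both sides are 0
    rw [pvAeq, PySem.List.pyRange_one_eq_nil h]
    unfold count_inter_segment_conflicts_alt
    rw [if_pos h]
    simp
  · rw [pvAeq, pvBeq queens s1 e1 s2 e2 h]
    rw [pvSumComm]
    have step : ∀ c2 ∈ PySem.List.pyRange s2 e2 1,
        ((PySem.List.pyRange s1 e1 1).map (fun c1 =>
            if |PySem.List.pyGetD queens c1 0 - PySem.List.pyGetD queens c2 0| = |c1 - c2|
            then (1 : Int) else 0)).sum
          = ((PySem.List.pyRange s1 e1 1).map (fun c1 =>
              if PySem.List.pyGetD queens c1 0 - c1 = PySem.List.pyGetD queens c2 0 - c2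
              then (1 : Int) else 0)).sum
            + ((PySem.List.pyRange s1 e1 1).map (fun c1 =>
              if PySem.List.pyGetD queens c1 0 + c1 = PySem.List.pyGetD queens c2 0 + c2
              then (1 : Int) else 0)).sum
            - (if s1 ≤ c2 ∧ c2 < e1 then (1 : Int) else 0) := by
      intro c2 _
      rw [pvSumSplit _ _
          (fun c1 => if PySem.List.pyGetD queens c1 0 - c1 = PySem.List.pyGetD queens c2 0 - c2 then (1:Int) else 0)
          (fun c1 => if PySem.List.pyGetD queens c1 0 + c1 = PySem.List.pyGetD queens c2 0 + c2 then (1:Int) else 0)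
          (fun c1 => if c1 = c2 then (1:Int) else 0)
          (fun c1 _ => pvPointwise queens c1 c2)]
      congr 1
      rw [pvSumEqIndicator _ (PySem.List.nodup_pyRange_one s1 e1) c2]
      congr 1
      simp [PySem.List.mem_pyRange_one]
    rw [pvSumSplit _ _
        (fun c2 => ((PySem.List.pyRange s1 e1 1).map (fun c1 =>
            if PySem.List.pyGetD queens c1 0 - c1 = PySem.List.pyGetD queens c2 0 - c2
            then (1 : Int) else 0)).sum
          + ((PySem.List.pyRange s1 e1 1).map (fun c1 =>
            if PySem.List.pyGetD queens c1 0 + c1 = PySem.List.pyGetD queens c2 0 + c2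
            then (1 : Int) else 0)).sum)
        (fun c2 => (0 : Int))
        (fun c2 => if s1 ≤ c2 ∧ c2 < e1 then (1 : Int) else 0)
        (by intro c2 hc2; have := step c2 hc2; simpa using by linarith [this])]
    rw [pvOverlap s1 e1 s2 e2]
    simp
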